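/- GENERATED by mk_final_copies.py from the proof of the farm's unit `vorbis_decode_packet_rest.15` (farm:vorbis_decode_packet_rest.15.2: Proof.lean) as the
   re-elaboration sweep compiled it — do not edit. -/
import Asan.CheckWalk
import Vorbis.Spec.PacketRestFrame
import Vorbis.Spec.Units.vorbis_decode_packet_rest_15

open X86 X86.User Asan Vorbis Vorbis.Spec Vorbis.Spec.vorbis_decode_packet_rest

set_option maxRecDepth 4000
set_option maxHeartbeats 4000000

namespace Vorbis.Spec.vorbis_decode_packet_rest_15

/-- The shadow byte of granule `sb + k`, as the word the walker computes for `[r13 + 0xC00000 + k]` with `r13 = sb`. -/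
theorem shadowAddr_word (sb k : Nat) : shadowAddr (sb + k) = UInt64.ofNat sb + UInt64.ofNat (0xC00000 + k) := by
  unfold shadowAddr
  rw [← UInt64.ofNat_add]
  congr 1
  omega

/-- The memory the walker has after the seven stores 0x111a3e … 0x111a80 is the memory after the epilogue stores of the layout
`Vorbis.Frames.vorbis_decode_packet_rest` (the form `ShadowInv.epilogue_ra` speaks of). -/
theorem epilogue_mem (m : Mem) (sb : Nat) :
    ((((((m.writeLE (UInt64.ofNat sb + 12582912) 4 0).writeLE (UInt64.ofNat sb + 12582932) 4 0).writeLE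
      (UInt64.ofNat sb + 12582968) 8 0).writeLE (UInt64.ofNat sb + 12583104) 8 0).writeLE
      (UInt64.ofNat sb + 12583112) 8 0).writeLE (UInt64.ofNat sb + 12583248) 8 0).writeLE
      (UInt64.ofNat sb + 12583256) 8 0 =
    storesMem m sb Vorbis.Frames.vorbis_decode_packet_rest.epilogue := by
  unfold storesMem Vorbis.Frames.vorbis_decode_packet_rest
  simp only [List.foldl_cons, List.foldl_nil, shadowAddr_word]
  rfl

/-- A read that ends at or below the one window of a footprint is the same in both memories. -/
theorem readLE_below {m m' : Mem} {lo hi : Nat} (h : Mem.SameExcept [⟨lo, hi⟩] m m') (a n : Nat) (ha : a + n ≤ lo)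
    (hlo : lo < 2 ^ 64) : m'.readLE (addr a) n = m.readLE (addr a) n := by
  have ea : (addr a).toNat = a := toNat_addr a (by omega)
  apply h.readLE (addr a) n
  · rw [ea]
    omega
  · intro w hw
    have e1 : w = ⟨lo, hi⟩ := List.mem_singleton.mp hw
    subst e1
    rw [ea]
    exact Or.inl ha

/-- A byte below the window reads the same. -/
theorem u8_below {m m' : Mem} {lo hi : Nat} (h : Mem.SameExcept [⟨lo, hi⟩] m m') (a : Nat) (ha : a + 1 ≤ lo)
    (hlo : lo < 2 ^ 64) : m'.u8 a = m.u8 a :=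
  readLE_below h a 1 ha hlo

/-- An `int` below the window reads the same. -/
theorem i32_below {m m' : Mem} {lo hi : Nat} (h : Mem.SameExcept [⟨lo, hi⟩] m m') (a : Nat) (ha : a + 4 ≤ lo)
    (hlo : lo < 2 ^ 64) : m'.i32 a = m.i32 a := by
  unfold Mem.i32 Mem.u32
  rw [readLE_below h a 4 ha hlo]

end Vorbis.Spec.vorbis_decode_packet_rest_15

open Vorbis.Spec.vorbis_decode_packet_rest_15

/-- Segment 15 of `vorbis_decode_packet_rest` (0x111a3e … 0x111a9c, lines 3208 / 3474): the common epilogue — seven stores of 0 over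
the 48 poisoned shadow bytes of the protected frame, `add rsp, 0xb88`, six pops, `ret`. From `At15` to the function's `Returned`:
the shadow layer is the caller's again (`ShadowInv.epilogue_ra`), `DecodeInv` is carried over the frame boundary
(`DecodeInv.carry`), the value clauses of the post read the same because no store went below C00000H. -/
theorem Vorbis.Spec.Worked.vorbis_decode_packet_rest_15_ok : Vorbis.Spec.vorbis_decode_packet_rest_15.Statement := by
  intro Lay hLay μ hμ u₀ hcode others frames len Ar stored room mode ysz e ret v hat
  -- 1. the ENTRY state's facts
  have he := hat.entry
  v_entry he
  obtain ⟨hsh, hinv, hargs⟩ := hat.pre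
  -- 2. the PRESENT state's facts (not under `w_` names: the walker clears those after the first step, and rsp / r13 / rax are
  -- not written by the seven stores)
  have w_rip := hat.rip
  have h_rsp : v.reg .rsp = e.reg .rsp - 3000 := hat.rsp
  have h_rax := hat.rax
  have w_eq : Mem.EqOn Vorbis.L.textLo Vorbis.L.textHi u₀.mem v.mem := hat.code
  have hdf : v.flags .df = false := (show abiInv _ from hat.abi).1
  have hmx : v.mxcsr &&& 0x1F80 = 0x1F80 := (show abiInv _ from hat.abi).2
  have hsse := Vorbis.sseOK_of_abiInv hat.abi
  -- r13 = SB, a number in the stack's shadow index range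
  obtain ⟨sb, hsb⟩ : ∃ sb : Nat, sbOf e = sb := ⟨_, rfl⟩
  have hsb_lo : 0xE0000 ≤ sb := by
    rw [← hsb]
    unfold sbOf
    omega
  have hsb_hi : sb + 352 ≤ 0x100000 := by
    rw [← hsb]
    unfold sbOf
    omega
  have h_r13 : v.reg .r13 = UInt64.ofNat sb := by
    rw [← hsb, ← hat.r13]
    exact (UInt64.ofNat_toNat).symm
  -- 3. the stack slots the segment pops
  have s0 := hat.ra
  have s1 := hat.s_r15
  have s2 := hat.s_r14
  have s3 := hat.s_r13
  have s4 := hat.s_r12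
  have s5 := hat.s_rbp
  have s6 := hat.s_rbx
  -- 4. the walk: 0x111a3e … the `ret` at 0x111a9c
  u_walk hcode [hμ.vendor] span [Vorbis.L.textLo, Vorbis.L.textHi] side (v_side)
  -- 5. the memory at the `ret` is the layout's epilogue applied to the memory of the cut
  have hM : s_111a9c.mem = storesMem v.mem (sbOf e) Vorbis.Frames.vorbis_decode_packet_rest.epilogue := by
    rw [w_mem, epilogue_mem, hsb]
  -- … which differs from it in the frame's 352 shadow bytes only
  have hsame15 : Mem.SameExcept [⟨0xC00000 + sbOf e, 0xC00000 + sbOf e + 352⟩] v.mem s_111a9c.mem := by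
    rw [hM]
    exact storesMem_sameExcept v.mem (sbOf e) 352 _ (by decide) (by omega)
  have hlo15 : 0xC00000 ≤ 0xC00000 + sbOf e := Nat.le_add_right _ _
  have hhi15 : 0xC00000 + sbOf e < 2 ^ 64 := by omega
  -- 6. the shadow layer after the epilogue: the caller's frames, the clean stack ends at the caller's rsp again (SH4)
  have hfr : ∀ bF, bF ∈ frames → (e.reg .rsp).toNat + 8 ≤ bF.1 := by
    intro bF hbF
    exact (hsh.inv.stack.active bF hbF).2.2.1
  have hshadow : ShadowInv others frames ((e.reg .rsp).toNat + 8) s_111a9c.mem := by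
    rw [hM]
    exact ShadowInv.epilogue_ra (top := (e.reg .rsp).toNat) (F := Vorbis.Frames.vorbis_decode_packet_rest)
      hat.shadow he_align he_top hfr
  -- 7. the decode-time invariant over the frame boundary: every allocated block lies below C00000H
  have hk : AllKept (RunBlk Ar len) v.mem s_111a9c.mem := by
    apply AllKept.of_sameExcept hat.inv.ok hsame15
    intro B hB w hw
    have e1 : w = ⟨0xC00000 + sbOf e, 0xC00000 + sbOf e + 352⟩ := List.mem_singleton.mp hw
    subst e1
    have hin := hat.inv.ok.inside B hB
    simp only []
    omega
  have hdec : DecodeInv others frames len Ar stored room ysz s_111a9c.mem (fOf e) :=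
    hat.inv.carry hat.shadow hk hshadow
  -- 8. the values the post speaks of lie below C00000H: `*f` (an arena block), `m` inside `*f` (MD1), `len` / `p_left` (stack objects)
  have hf := hinv.objLive.inside hsh.inv (by decide)
  simp only [Vorbis.Off.sizeof.stb_vorbis] at hf
  have hmode : mode < 64 := hinv.fb.vorbis.mode.mode_index_lt hargs.mode_lt
  have hm : mOf e = fOf e + 484 + 6 * mode := by
    rw [hargs.m_eq]
    simp only [vacc, voff]
  have hlen := hargs.len_obj.2
  have hleft := hargs.left_obj.2
  have e_b0 : stb_vorbis.blocksize_0 s_111a9c.mem (fOf e) = stb_vorbis.blocksize_0 v.mem (fOf e) :=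
    i32_below hsame15 _ (by simp only [voff]; omega) hhi15
  have e_b1 : stb_vorbis.blocksize_1 s_111a9c.mem (fOf e) = stb_vorbis.blocksize_1 v.mem (fOf e) :=
    i32_below hsame15 _ (by simp only [voff]; omega) hhi15
  have e_flag : Mode.blockflag s_111a9c.mem (mOf e) = Mode.blockflag v.mem (mOf e) :=
    u8_below hsame15 _ (by simp only [voff]; omega) hhi15
  have e_n : nIntOf s_111a9c.mem (fOf e) (mOf e) = nIntOf v.mem (fOf e) (mOf e) := by
    unfold nIntOf
    rw [e_flag, e_b0, e_b1]
  have e_left : s_111a9c.mem.i32 (pLeftOf e) = v.mem.i32 (pLeftOf e) :=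
    i32_below hsame15 _ (by omega) hhi15
  have e_len : s_111a9c.mem.i32 (lenOf e) = v.mem.i32 (lenOf e) :=
    i32_below hsame15 _ (by omega) hhi15
  have e_first : stb_vorbis.first_decode s_111a9c.mem (fOf e) = stb_vorbis.first_decode v.mem (fOf e) :=
    u8_below hsame15 _ (by simp only [voff]; omega) hhi15
  have e_seg : stb_vorbis.bytes_in_seg s_111a9c.mem (fOf e) = stb_vorbis.bytes_in_seg v.mem (fOf e) :=
    u8_below hsame15 _ (by simp only [voff]; omega) hhi15
  -- 9. the `ret`: the function's `Returned`
  refine ReachVia.done ?_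
  v_returned
  · -- the post
    refine ⟨?_, ?_, hdec, ?_, ?_, ?_, ?_⟩
    · -- eax = 1: not written since the cut
      rw [w_kept .rax rfl]
      exact h_rax
    · -- the caller's shadow layer
      rw [w_rsp]
      have e8 : (e.reg .rsp + 8).toNat = (e.reg .rsp).toNat + 8 := by u_omega
      rw [e8]
      exact hshadow
    · -- W3
      rw [e_b1, e_n, e_left, e_len]
      exact hat.w3
    · rw [e_left]
      exact hat.left_ge
    · rw [e_first]
      exact hat.first
    · rw [e_seg]
      exact hat.drained
  · -- the callee-saved registers: six popped back
    intro r hr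
    cases r <;> first
      | (exact absurd hr (by decide))
      | (with_reducible assumption)
  · -- the footprint: the frame's 352 shadow bytes lie in the shadow of the function's stack area `[rsp − 3856, rsp)`
    refine hat.same.step_same hsame15 ?_
    intro w hw a h1 h2
    have e1 : w = ⟨0xC00000 + sbOf e, 0xC00000 + sbOf e + 352⟩ := List.mem_singleton.mp hw
    subst e1
    simp only [] at h1 h2
    apply covered_footprint
    refine Or.inr (Or.inr (Or.inr (Or.inr (Or.inr (Or.inr (Or.inr (Or.inl ?_)))))))
    unfold shadowSpan
    unfold sbOf at h1 h2
    simp only []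
    omega
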